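-- pv_equiv track=rewrite | github.com/as950118/UnixLinux | outsource/_3(추가사항).py | permAll_FromArrs
-- ===== SOURCE A (Python) =====
-- def permAll_FromArrs(arr): #arr는 찾을 배열, end는 몇개를 찾을지
--     trans_arr = list()
--     for key in arr:
--         trans_arr += arr[key]
--     def func(cur, remainder):
--         ret = list()
--         if not remainder:#남은게없다면 종료
--             ret.append(cur)
--         else:
--             ret.append(cur)
--             for next_idx in range(len(remainder)):
--                 next_remainder = remainder[:] #다음 remainder
--                 next_val = next_remainder.pop(next_idx) #next_idx에 위치하는 값을 제거하고 남은 리스트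
--                 ret += func(cur + next_val, next_remainder)
--         return ret
--     return func("", trans_arr)
-- ===== SOURCE B (Python) =====
-- def permAll_FromArrs(arr):
--     trans_arr = list()
--     for key in arr:
--         trans_arr += arr[key]
--     result = []
--     stack = [("", trans_arr)]
--     while stack:
--         cur, remainder = stack.pop()
--         result.append(cur)
--         for i in range(len(remainder) - 1, -1, -1):
--             next_remainder = remainder[:]
--             next_val = next_remainder.pop(i)
--             stack.append((cur + next_val, next_remainder))
--     return result
-- ===== Notes on version B (the rewrite author's own statement) =====
-- stated objective: alternative
-- what changed: The recursive prefix-enumeration helper is replaced by an explicit stack-based iterative DFS (frames pushed in reverse index order) that emits the same pre-order sequence without recursion.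
import Mathlib
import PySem

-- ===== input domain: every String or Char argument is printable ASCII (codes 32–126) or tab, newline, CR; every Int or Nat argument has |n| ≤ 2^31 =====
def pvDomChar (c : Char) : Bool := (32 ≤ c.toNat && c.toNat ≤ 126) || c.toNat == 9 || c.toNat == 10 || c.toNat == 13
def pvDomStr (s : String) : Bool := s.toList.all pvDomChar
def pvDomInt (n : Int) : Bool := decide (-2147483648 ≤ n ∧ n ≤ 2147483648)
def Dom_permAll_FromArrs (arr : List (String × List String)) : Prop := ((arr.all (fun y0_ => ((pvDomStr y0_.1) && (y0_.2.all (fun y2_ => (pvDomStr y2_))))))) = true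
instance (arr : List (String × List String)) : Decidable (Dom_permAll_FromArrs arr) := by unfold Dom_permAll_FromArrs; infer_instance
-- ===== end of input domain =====

-- B changes the decomposition only: the recursive helper of A becomes an explicit stack-based
-- iterative DFS producing the identical pre-order list; same asymptotic cost (output-dominated).

-- ===== PORT A =====
-- inner helper `func(cur, remainder)` of A: pre-order enumeration of all permutation prefixes
def permA_func (cur : String) (remainder : List String) : List String :=
  if remainder.isEmpty then [cur]
  else
    -- ret = [cur]; for next_idx in range(len(remainder)): ret += func(cur + v, rem-without-idx)
    [cur] ++ (PySem.List.pyRange 0 (remainder.length : Int) 1).flatMap (fun i =>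
      match h : PySem.List.pop? remainder i with
      | some pr => permA_func (cur ++ pr.1) pr.2
      | none => [])
termination_by remainder.length
decreasing_by
  have := PySem.List.length_of_pop?_eq_some remainder h
  omega

def permAll_FromArrs (arr : List (String × List String)) : List String :=
  -- trans_arr = []; for key in arr: trans_arr += arr[key]   (arr is a Python dict)
  let d := PySem.Dict.ofList arr
  let trans := d.keys.foldl (fun t k => t ++ d.getD k []) []
  permA_func "" trans

-- ===== PORT B =====
-- one child frame: (cur + remainder[i], remainder with index i popped); default unreachable (i in range)
def pvChild (cur : String) (rem : List String) (i : Int) : String × List String :=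
  match PySem.List.pop? rem i with
  | some pr => (cur ++ pr.1, pr.2)
  | none => (cur, [])

-- the inner push loop: for i in range(len(rem)-1, -1, -1): stack.append(child i)   (head = top of stack)
def pvChildStack (cur : String) (rem : List String) : List (String × List String) :=
  (PySem.List.pyRange ((rem.length : Int) - 1) (-1) (-1)).foldl (fun st i => pvChild cur rem i :: st) []

-- termination measure: number of nodes of the tree rooted at a frame with n remaining items
def pvWeight : Nat → Nat
  | 0 => 1
  | n + 1 => 1 + (n + 1) * pvWeight n

def pvMeasure (stack : List (String × List String)) : Nat :=
  (stack.map (fun f => pvWeight f.2.length)).sum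

-- the following three lemmas are cited by the port's decreasing_by, so they live above it
theorem pvFoldl_cons_rev {α β : Type} (f : α → β) :
    ∀ (l : List α) (acc : List β), l.foldl (fun st i => f i :: st) acc = (l.map f).reverse ++ acc := by
  intro l
  induction l with
  | nil => intro acc; simp
  | cons x xs ih => intro acc; simp [List.foldl_cons, ih, List.append_assoc]

theorem pvChildStack_eq_map (cur : String) (rem : List String) :
    pvChildStack cur rem = (PySem.List.pyRange 0 (rem.length : Int) 1).map (pvChild cur rem) := by
  unfold pvChildStack
  rw [PySem.List.pyRange_neg_one_eq_reverse]
  have h1 : (-1 : Int) + 1 = 0 := by norm_num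
  have h2 : ((rem.length : Int) - 1) + 1 = (rem.length : Int) := by ring
  rw [h1, h2, pvFoldl_cons_rev]
  simp

theorem pvMeasure_childStack_lt (cur : String) (rem : List String) :
    pvMeasure (pvChildStack cur rem) < pvWeight rem.length := by
  rw [pvChildStack_eq_map]
  unfold pvMeasure
  rcases Nat.eq_zero_or_pos rem.length with h0 | hpos
  · have : rem = [] := List.length_eq_zero_iff.mp h0
    subst this
    simp [PySem.List.pyRange_one_eq_nil, pvWeight]
  · have hcong : ((PySem.List.pyRange 0 ((rem.length : Int)) 1).map (pvChild cur rem)).map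
        (fun f => pvWeight f.2.length)
        = (PySem.List.pyRange 0 ((rem.length : Int)) 1).map (fun _ => pvWeight (rem.length - 1)) := by
      rw [List.map_map]
      apply List.map_congr_left
      intro i hi
      have hmem := (PySem.List.mem_pyRange_one).mp hi
      obtain ⟨k, rfl⟩ : ∃ k : Nat, i = (k : Int) := ⟨i.toNat, by omega⟩
      have hk : k < rem.length := by omega
      simp [Function.comp, pvChild, PySem.List.pop?_natCast rem k hk, List.length_eraseIdx, hk]
    rw [hcong]
    have hlen : (PySem.List.pyRange 0 ((rem.length : Int)) 1).length = rem.length := by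
      rw [PySem.List.length_pyRange_one]; omega
    rw [List.map_const', List.sum_replicate, hlen]
    obtain ⟨m, hm⟩ : ∃ m, rem.length = m + 1 := ⟨rem.length - 1, by omega⟩
    rw [hm]
    simp [pvWeight, smul_eq_mul]

-- the DFS loop: while stack: cur, rem = stack.pop(); result.append(cur); push children reversed
def permB_dfs (stack : List (String × List String)) (result : List String) : List String :=
  match stack with
  | [] => result
  | (cur, rem) :: rest => permB_dfs (pvChildStack cur rem ++ rest) (result ++ [cur])
termination_by pvMeasure stack
decreasing_by
  have h := pvMeasure_childStack_lt cur rem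
  simp only [pvMeasure, List.map_append, List.sum_append, List.map_cons, List.sum_cons] at *
  omega

def permAll_FromArrs_alt (arr : List (String × List String)) : List String :=
  -- trans_arr = []; for key in arr: trans_arr += arr[key]   (arr is a Python dict)
  let d := PySem.Dict.ofList arr
  let trans := d.keys.foldl (fun t k => t ++ d.getD k []) []
  permB_dfs [("", trans)] []

-- ===== PRECONDITION & SPEC =====
def Spec_permAll_FromArrs (arr : List (String × List String)) (out : List String) : Prop := out = permAll_FromArrs_alt arr
instance (arr : List (String × List String)) (out : List String) : Decidable (Spec_permAll_FromArrs arr out) := by unfold Spec_permAll_FromArrs; infer_instance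

-- ===== CLAIM (what is proved, stated in full; the proofs are below) =====
def Claim_equal_permAll_FromArrs : Prop := ∀ (arr : List (String × List String)), Dom_permAll_FromArrs arr → Spec_permAll_FromArrs arr (permAll_FromArrs arr)

-- ===== LEMMAS AND PROOFS =====

-- one unfolding of A's helper, phrased through B's child-frame list
theorem permA_func_unfold (cur : String) (rem : List String) :
    permA_func cur rem
      = [cur] ++ (pvChildStack cur rem).flatMap (fun f => permA_func f.1 f.2) := by
  rw [pvChildStack_eq_map, permA_func.eq_def]
  by_cases hrem : rem = []
  · subst hrem
    simp [PySem.List.pyRange_one_eq_nil]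
  · have : rem.isEmpty = false := by simp [hrem]
    rw [this]
    simp only [Bool.false_eq_true, if_false, List.flatMap_map, List.append_cancel_left_eq]
    rw [List.flatMap_def, List.flatMap_def]
    congr 1
    apply List.map_congr_left
    intro i hi
    have hmem := (PySem.List.mem_pyRange_one).mp hi
    obtain ⟨k, rfl⟩ : ∃ k : Nat, i = (k : Int) := ⟨i.toNat, by omega⟩
    have hk : k < rem.length := by omega
    simp only [pvChild, PySem.List.pop?_natCast rem k hk]
    split
    · next pr hpr =>
        simp only [PySem.List.pop?_natCast rem k hk, Option.some.injEq] at hpr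
        rw [← hpr]
    · next hpr =>
        simp only [PySem.List.pop?_natCast rem k hk] at hpr
        cases hpr

-- the DFS loop computes, onto its accumulator, A's helper applied to every frame in stack order
theorem permB_dfs_eq (stack : List (String × List String)) (result : List String) :
    permB_dfs stack result = result ++ stack.flatMap (fun f => permA_func f.1 f.2) := by
  induction stack, result using permB_dfs.induct with
  | case1 res => simp [permB_dfs]
  | case2 res cur rem rest ih =>
      rw [permB_dfs, ih]
      simp [List.flatMap_cons, permA_func_unfold cur rem, List.append_assoc]

-- ===== VERDICT (by name: the statement is the Claim_ definition above) =====
theorem permAll_FromArrs_spec : Claim_equal_permAll_FromArrs := by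
  intro arr _
  unfold Spec_permAll_FromArrs permAll_FromArrs permAll_FromArrs_alt
  simp [permB_dfs_eq]
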